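-- pv_equiv track=rewrite | github.com/JonnyBowser/Aoc | 2023/10/b.py | convert
-- ===== SOURCE A (Python) =====
-- def convert(arr, pos):
--     # simplify everything into tempArr
--     tempArr = [["." for i in range(len(arr[x]))] for x in range(len(arr))]
--     for p in pos:
--         tempArr[p[0]][p[1]] = arr[p[0]][p[1]]
--
--     # make the S into what it actually should be
--     if pos[0][1] < pos[1][1]:
--         if pos[0][0] < pos[-1][0]:
--             s = "F"
--         elif pos[0][0] > pos[-1][0]:
--             s = "L"
--         else:
--             s = "-"
--     elif pos[0][1] > pos[1][1]:
--         if pos[0][0] < pos[-1][0]: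
--             s = "7"
--         elif pos[0][0] > pos[-1][0]:
--             s = "J"
--         else:
--             s = "-"
--     else:
--         s = "|"
--     tempArr[pos[0][0]][pos[0][1]] = s
--
--     # expand everything into newArr
--     newArr = [[0 for i in range(3 * len(arr[0]))] for x in range(3 * len(arr))]
--     for row in range(len(tempArr)):
--         for col in range(len(tempArr[row])):
--             pipe = tempArr[row][col]
--             if pipe == ".":
--                 for i in range(3):
--                     for x in range(3):
--                         newArr[3 * row + i][3 * col + x] = "."
--             else:
--                 for i in range(0, 3, 2):
--                     for x in range(0, 3, 2):
--                         newArr[3 * row + i][3 * col + x] = "."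
--                 if pipe == "J":
--                     up, down, left, right = "#", ".", "#", "."
--                 elif pipe == "L":
--                     up, down, left, right = "#", ".", ".", "#"
--                 elif pipe == "F":
--                     up, down, left, right = ".", "#", ".", "#"
--                 elif pipe == "7":
--                     up, down, left, right = ".", "#", "#", "."
--                 elif pipe == "|":
--                     up, down, left, right = "#", "#", ".", "."
--                 elif pipe == "-":
--                     up, down, left, right = ".", ".", "#", "#"
--                 newArr[3 * row + 1][3 * col + 1] = "#"
--                 newArr[3 * row][3 * col + 1] = up
--                 newArr[3 * row + 2][3 * col + 1] = down
--                 newArr[3 * row + 1][3 * col] = left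
--                 newArr[3 * row + 1][3 * col + 2] = right
--
--     return newArr
-- ===== SOURCE B (Python) =====
-- # B: same tempArr/S-resolution phase; the expansion is rebuilt: a pattern table
-- # maps each tile to its 3x3 block and the output rows are constructed directly
-- # (no preallocated grid, no per-arm branching, no index assignment).
-- PAT = {
--     ".": [[".", ".", "."], [".", ".", "."], [".", ".", "."]],
--     "|": [[".", "#", "."], [".", "#", "."], [".", "#", "."]],
--     "-": [[".", ".", "."], ["#", "#", "#"], [".", ".", "."]],
--     "J": [[".", "#", "."], ["#", "#", "."], [".", ".", "."]],
--     "L": [[".", "#", "."], [".", "#", "#"], [".", ".", "."]],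
--     "F": [[".", ".", "."], [".", "#", "#"], [".", "#", "."]],
--     "7": [[".", ".", "."], ["#", "#", "."], [".", "#", "."]],
-- }
--
--
-- def convert(arr, pos):
--     # simplify everything into tempArr
--     tempArr = [["." for i in range(len(arr[x]))] for x in range(len(arr))]
--     for p in pos:
--         tempArr[p[0]][p[1]] = arr[p[0]][p[1]]
--
--     # make the S into what it actually should be
--     if pos[0][1] < pos[1][1]:
--         if pos[0][0] < pos[-1][0]:
--             s = "F"
--         elif pos[0][0] > pos[-1][0]:
--             s = "L"
--         else:
--             s = "-"
--     elif pos[0][1] > pos[1][1]: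
--         if pos[0][0] < pos[-1][0]:
--             s = "7"
--         elif pos[0][0] > pos[-1][0]:
--             s = "J"
--         else:
--             s = "-"
--     else:
--         s = "|"
--     tempArr[pos[0][0]][pos[0][1]] = s
--
--     # expand: each tile becomes its 3x3 pattern, rows built directly
--     newArr = []
--     for trow in tempArr:
--         for i in range(3):
--             newArr.append([c for cell in trow for c in PAT[cell][i]])
--     return newArr
-- ===== Notes on version B (the rewrite author's own statement) =====
-- stated objective: simpler
-- what changed: The expansion phase no longer preallocates a 3Rx3W grid and patches it with a corner loop plus a 6-way per-arm branch; instead a fixed table maps each tile to its 3x3 pattern and the output rows are built directly by concatenating pattern rows.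
import Mathlib
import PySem

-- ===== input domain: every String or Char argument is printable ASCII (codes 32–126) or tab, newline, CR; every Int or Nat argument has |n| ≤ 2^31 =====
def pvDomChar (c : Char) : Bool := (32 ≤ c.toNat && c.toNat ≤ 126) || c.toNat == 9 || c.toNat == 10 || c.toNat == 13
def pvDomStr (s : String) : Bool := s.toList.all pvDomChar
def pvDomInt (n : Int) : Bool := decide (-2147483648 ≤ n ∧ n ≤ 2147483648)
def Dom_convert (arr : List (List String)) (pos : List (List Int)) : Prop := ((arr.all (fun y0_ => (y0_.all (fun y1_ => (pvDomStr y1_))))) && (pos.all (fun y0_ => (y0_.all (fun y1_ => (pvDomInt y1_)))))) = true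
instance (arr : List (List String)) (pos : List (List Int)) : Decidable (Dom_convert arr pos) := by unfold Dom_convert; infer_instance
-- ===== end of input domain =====

-- B replaces A's patch-a-preallocated-grid expansion (corner loop + 6-way per-arm branch +
-- 5 indexed writes) by a fixed tile → 3x3-pattern table and direct row construction.
-- Both Pythons mutate only lists they allocate themselves; the arguments are not mutated.

-- ===== PORT A =====

-- xs[i] = v  (negative i from the end; i out of range is IndexError, excluded by Pre_, here a no-op)
def setIdxI (xs : List String) (i : Int) (v : String) : List String :=
  let j : Int := if i < 0 then i + xs.length else i
  if 0 ≤ j ∧ j < (xs.length : Int) then xs.set j.toNat v else xs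

-- g[r][c] = v  (same convention)
def setCellI (g : List (List String)) (r c : Int) (v : String) : List (List String) :=
  let j : Int := if r < 0 then r + g.length else r
  if 0 ≤ j ∧ j < (g.length : Int) then g.set j.toNat (setIdxI (g.getD j.toNat []) c v) else g

-- p[i]  (IndexError excluded by Pre_)
def getI (p : List Int) (i : Int) : Int := (PySem.List.pyGet? p i).getD 0

-- arr[r][c]  (IndexError excluded by Pre_)
def cellAt (arr : List (List String)) (r c : Int) : String :=
  (PySem.List.pyGet? ((PySem.List.pyGet? arr r).getD []) c).getD ""

-- the "make the S into what it actually should be" if/elif chain of both Pythons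
def sRes (p0 p1 pl : List Int) : String :=
  if getI p0 1 < getI p1 1 then
    if getI p0 0 < getI pl 0 then "F" else if getI pl 0 < getI p0 0 then "L" else "-"
  else if getI p1 1 < getI p0 1 then
    if getI p0 0 < getI pl 0 then "7" else if getI pl 0 < getI p0 0 then "J" else "-"
  else "|"

-- the tempArr phase (identical source lines in A and in B, ported once and used by both ports)
def buildTemp (arr : List (List String)) (pos : List (List Int)) : List (List String) :=
  let temp0 := (List.range arr.length).map (fun x => (List.range ((arr.getD x []).length)).map (fun _ => "."))
  let temp1 := pos.foldl (fun t p => setCellI t (getI p 0) (getI p 1) (cellAt arr (getI p 0) (getI p 1))) temp0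
  setCellI temp1 (getI ((PySem.List.pyGet? pos 0).getD []) 0) (getI ((PySem.List.pyGet? pos 0).getD []) 1)
    (sRes ((PySem.List.pyGet? pos 0).getD []) ((PySem.List.pyGet? pos 1).getD []) ((PySem.List.pyGet? pos (-1)).getD []))

-- newArr[i][c] = v with Nat indices (an out-of-range write is IndexError, excluded by Pre_, here a no-op)
def setN (xs : List String) (i : Nat) (v : String) : List String := xs.set i v
def setCellN (g : List (List String)) (r c : Nat) (v : String) : List (List String) :=
  g.set r (setN (g.getD r []) c v)

-- the up/down/left/right if/elif chain; Python leaves the four names stale (or unbound,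
-- NameError) on any other tile — those inputs are excluded by Pre_
def quadOf (pipe : String) : String × String × String × String :=
  if pipe == "J" then ("#", ".", "#", ".")
  else if pipe == "L" then ("#", ".", ".", "#")
  else if pipe == "F" then (".", "#", ".", "#")
  else if pipe == "7" then (".", "#", "#", ".")
  else if pipe == "|" then ("#", "#", ".", ".")
  else if pipe == "-" then (".", ".", "#", "#")
  else ("", "", "", "")

-- the body of A's double expansion loop for one tile
def expandCell (g : List (List String)) (row col : Nat) (pipe : String) : List (List String) :=
  if pipe == "." then
    (List.range 3).foldl (fun g i => (List.range 3).foldl (fun g x => setCellN g (3*row+i) (3*col+x) ".") g) g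
  else
    let g1 := ([0, 2] : List Nat).foldl (fun g i => ([0, 2] : List Nat).foldl (fun g x => setCellN g (3*row+i) (3*col+x) ".") g) g  -- range(0,3,2) = [0,2]
    let q := quadOf pipe
    let g2 := setCellN g1 (3*row+1) (3*col+1) "#"
    let g3 := setCellN g2 (3*row) (3*col+1) q.1
    let g4 := setCellN g3 (3*row+2) (3*col+1) q.2.1
    let g5 := setCellN g4 (3*row+1) (3*col) q.2.2.1
    setCellN g5 (3*row+1) (3*col+2) q.2.2.2

def convert (arr : List (List String)) (pos : List (List Int)) : List (List String) :=
  let t := buildTemp arr pos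
  -- Python preallocates with int 0; under Pre_ every cell is overwritten, "0" is a placeholder
  let new0 := (List.range (3 * arr.length)).map (fun _ => (List.range (3 * (arr.getD 0 []).length)).map (fun _ => "0"))
  (List.range t.length).foldl (fun g row =>
    (List.range ((t.getD row []).length)).foldl
      (fun g col => expandCell g row col ((t.getD row []).getD col "")) g) new0

-- ===== PORT B =====

-- the PAT table of Source B
def PATd : PySem.Dict String (List (List String)) := PySem.Dict.ofList
  [ (".", [[".", ".", "."], [".", ".", "."], [".", ".", "."]]),
    ("|", [[".", "#", "."], [".", "#", "."], [".", "#", "."]]),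
    ("-", [[".", ".", "."], ["#", "#", "#"], [".", ".", "."]]),
    ("J", [[".", "#", "."], ["#", "#", "."], [".", ".", "."]]),
    ("L", [[".", "#", "."], [".", "#", "#"], [".", ".", "."]]),
    ("F", [[".", ".", "."], [".", "#", "#"], [".", "#", "."]]),
    ("7", [[".", ".", "."], ["#", "#", "."], [".", "#", "."]]) ]

-- PAT[cell][i]  (KeyError on a tile outside the table, excluded by Pre_)
def patRow (cell : String) (i : Nat) : List String :=
  ((PySem.Dict.get? PATd cell).getD []).getD i []

def convert_alt (arr : List (List String)) (pos : List (List Int)) : List (List String) :=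
  let t := buildTemp arr pos
  t.flatMap (fun trow => (List.range 3).map (fun i => trow.flatMap (fun cell => patRow cell i)))

-- ===== PRECONDITION & SPEC =====

-- the tile is one of the seven grid characters: ground (dot), vertical bar, dash, J, L, F, 7
def pipeOK (c : String) : Bool :=
  match c.toList with
  | [ch] => ch == '.' || ch == '|' || ch == '-' || ch == 'J' || ch == 'L' || ch == 'F' || ch == '7'
  | _ => false

-- Python's normalisation of a (possibly negative) in-range index
def nrm (i : Int) (n : Nat) : Nat := (if i < 0 then i + n else i).toNat

-- Pre_ excludes: empty arr / pos shorter than 2 / p shorter than 2 / out-of-range positions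
-- (Python raises IndexError); ragged arr (A raises IndexError or returns leftover int 0 cells,
-- not strings); and tiles selected by pos (other than the tile at pos[0], which is rewritten)
-- outside the seven grid characters (A raises NameError or renders them with stale loop
-- variables; B's table lookup raises KeyError there).
def Pre_convert (arr : List (List String)) (pos : List (List Int)) : Prop :=
  arr ≠ [] ∧
  (∀ row ∈ arr, row.length = (arr.getD 0 []).length) ∧
  2 ≤ pos.length ∧
  (∀ p ∈ pos, 2 ≤ p.length ∧
    -(arr.length : Int) ≤ getI p 0 ∧ getI p 0 < (arr.length : Int) ∧
    -((arr.getD 0 []).length : Int) ≤ getI p 1 ∧ getI p 1 < ((arr.getD 0 []).length : Int) ∧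
    ((nrm (getI p 0) arr.length, nrm (getI p 1) (arr.getD 0 []).length)
        = (nrm (getI ((PySem.List.pyGet? pos 0).getD []) 0) arr.length,
           nrm (getI ((PySem.List.pyGet? pos 0).getD []) 1) (arr.getD 0 []).length)
      ∨ pipeOK (cellAt arr (getI p 0) (getI p 1)) = true))

instance (arr : List (List String)) (pos : List (List Int)) : Decidable (Pre_convert arr pos) := by
  unfold Pre_convert; infer_instance

def pvWitness_convert : List (List String) × List (List Int) :=
  ([["S", "-"], [".", "."]], [[0, 0], [0, 1]])

def Spec_convert (arr : List (List String)) (pos : List (List Int)) (out : List (List String)) : Prop := out = convert_alt arr pos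
instance (arr : List (List String)) (pos : List (List Int)) (out : List (List String)) : Decidable (Spec_convert arr pos out) := by unfold Spec_convert; infer_instance

-- ===== CLAIM (what is proved, stated in full; the proofs are below) =====
def Claim_equal_convert : Prop := ∀ (arr : List (List String)) (pos : List (List Int)), Dom_convert arr pos → Pre_convert arr pos → Spec_convert arr pos (convert arr pos)

-- ===== LEMMAS AND PROOFS =====

lemma pipeOK_cases (c : String) (h : pipeOK c = true) :
    c = "." ∨ c = "|" ∨ c = "-" ∨ c = "J" ∨ c = "L" ∨ c = "F" ∨ c = "7" := by
  simp only [pipeOK] at h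
  rcases hl : c.toList with _ | ⟨ch, _ | tl⟩ <;> rw [hl] at h
  · simp at h
  · simp only [Bool.or_eq_true, beq_iff_eq] at h
    rcases h with ((((((h|h)|h)|h)|h)|h)|h) <;> subst h
    · exact Or.inl (String.toList_inj.mp (hl.trans (by rfl)))
    · exact Or.inr (Or.inl (String.toList_inj.mp (hl.trans (by rfl))))
    · exact Or.inr (Or.inr (Or.inl (String.toList_inj.mp (hl.trans (by rfl)))))
    · exact Or.inr (Or.inr (Or.inr (Or.inl (String.toList_inj.mp (hl.trans (by rfl))))))
    · exact Or.inr (Or.inr (Or.inr (Or.inr (Or.inl (String.toList_inj.mp (hl.trans (by rfl)))))))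
    · exact Or.inr (Or.inr (Or.inr (Or.inr (Or.inr (Or.inl (String.toList_inj.mp (hl.trans (by rfl))))))))
    · exact Or.inr (Or.inr (Or.inr (Or.inr (Or.inr (Or.inr (String.toList_inj.mp (hl.trans (by rfl))))))))
  · simp at h

lemma setCellN_off (done g : List (List String)) (k c : Nat) (v : String) :
    setCellN (done ++ g) (done.length + k) c v = done ++ setCellN g k c v := by
  simp [setCellN, List.getD, List.getElem?_append_right]

lemma setCellN_off0 (done g : List (List String)) (c : Nat) (v : String) :
    setCellN (done ++ g) done.length c v = done ++ setCellN g 0 c v := by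
  simpa using setCellN_off done g 0 c v

lemma setCellN_cons_zero (r : List String) (g : List (List String)) (c : Nat) (v : String) :
    setCellN (r :: g) 0 c v = setN r c v :: g := by
  simp [setCellN, List.getD]

lemma setCellN_cons_succ (r : List String) (g : List (List String)) (k c : Nat) (v : String) :
    setCellN (r :: g) (k+1) c v = r :: setCellN g k c v := by
  simp [setCellN, List.getD]

def z3 (m : Nat) : List String := "0" :: "0" :: "0" :: List.replicate m "0"

lemma set_off {p : List String} {L : Nat} (h : p.length = L) (zs : List String) (x : Nat) (v : String) :
    (p ++ zs).set (L + x) v = p ++ zs.set x v := by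
  subst h; simp

lemma set_off0 {p : List String} {L : Nat} (h : p.length = L) (zs : List String) (v : String) :
    (p ++ zs).set L v = p ++ zs.set 0 v := by
  simpa using set_off h zs 0 v

lemma cellstep (pipe : String) (hp : pipeOK pipe = true)
    (done rest : List (List String)) (p0 p1 p2 : List String) (row col : Nat)
    (hd : done.length = 3*row) (h0 : p0.length = 3*col) (h1 : p1.length = 3*col) (h2 : p2.length = 3*col)
    (m : Nat) :
    expandCell (done ++ (p0 ++ z3 m) :: (p1 ++ z3 m) :: (p2 ++ z3 m) :: rest) row col pipe
      = done ++ (p0 ++ patRow pipe 0 ++ List.replicate m "0")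
             :: (p1 ++ patRow pipe 1 ++ List.replicate m "0")
             :: (p2 ++ patRow pipe 2 ++ List.replicate m "0") :: rest := by
  have e0 : (3*col : Nat) = p0.length := h0.symm
  have e1 : p1.length = p0.length := by omega
  have e2 : p2.length = p0.length := by omega
  have ed : (3*row : Nat) = done.length := hd.symm
  rcases pipeOK_cases pipe hp with (h|h|h|h|h|h|h) <;> subst h <;>
    simp only [expandCell, quadOf, z3, show (List.range 3) = [0,1,2] from by decide] <;>
    norm_num <;>
    rw [ed, e0] <;>
    simp only [setCellN_off, setCellN_off0, setCellN_cons_zero, setCellN_cons_succ] <;>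
    simp [setN, set_off (Eq.refl p0.length), set_off e1, set_off e2,
      set_off0 (Eq.refl p0.length), set_off0 e1, set_off0 e2,
      show patRow "." 0 = [".", ".", "."] from by decide,
      show patRow "." 1 = [".", ".", "."] from by decide,
      show patRow "." 2 = [".", ".", "."] from by decide,
      show patRow "|" 0 = [".", "#", "."] from by decide,
      show patRow "|" 1 = [".", "#", "."] from by decide,
      show patRow "|" 2 = [".", "#", "."] from by decide,
      show patRow "-" 0 = [".", ".", "."] from by decide,
      show patRow "-" 1 = ["#", "#", "#"] from by decide,
      show patRow "-" 2 = [".", ".", "."] from by decide,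
      show patRow "J" 0 = [".", "#", "."] from by decide,
      show patRow "J" 1 = ["#", "#", "."] from by decide,
      show patRow "J" 2 = [".", ".", "."] from by decide,
      show patRow "L" 0 = [".", "#", "."] from by decide,
      show patRow "L" 1 = [".", "#", "#"] from by decide,
      show patRow "L" 2 = [".", ".", "."] from by decide,
      show patRow "F" 0 = [".", ".", "."] from by decide,
      show patRow "F" 1 = [".", "#", "#"] from by decide,
      show patRow "F" 2 = [".", "#", "."] from by decide,
      show patRow "7" 0 = [".", ".", "."] from by decide,
      show patRow "7" 1 = ["#", "#", "."] from by decide,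
      show patRow "7" 2 = [".", "#", "."] from by decide]

def zRow (W : Nat) : List String := List.replicate (3*W) "0"

def bRow (trow : List String) (i : Nat) : List String := trow.flatMap (fun cell => patRow cell i)

lemma patRow_len (x : String) (hx : pipeOK x = true) (j : Nat) (hj : j < 3) :
    (patRow x j).length = 3 := by
  rcases pipeOK_cases x hx with (h|h|h|h|h|h|h) <;> subst h <;> interval_cases j <;> decide

lemma bRow_len (trow : List String) (h : ∀ x ∈ trow, pipeOK x = true) (j : Nat) (hj : j < 3) :
    (bRow trow j).length = 3 * trow.length := by
  induction trow with
  | nil => simp [bRow]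
  | cons a l ih =>
    have := patRow_len a (h a (by simp)) j hj
    simp only [bRow, List.flatMap_cons, List.length_append, this, List.length_cons]
    have := ih (fun x hx => h x (by simp [hx]))
    simp only [bRow] at this
    omega

lemma inner (trow : List String) (W : Nat) (hW : trow.length = W)
    (hok : ∀ x ∈ trow, pipeOK x = true) (row : Nat) (done rest : List (List String))
    (hd : done.length = 3*row) (c : Nat) (hc : c ≤ W) :
    (List.range c).foldl (fun g col => expandCell g row col (trow.getD col ""))
        (done ++ zRow W :: zRow W :: zRow W :: rest)
      = done ++ (bRow (trow.take c) 0 ++ List.replicate (3*(W-c)) "0")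
             :: (bRow (trow.take c) 1 ++ List.replicate (3*(W-c)) "0")
             :: (bRow (trow.take c) 2 ++ List.replicate (3*(W-c)) "0") :: rest := by
  induction c with
  | zero => simp [bRow, zRow]
  | succ c ih =>
    have hcW : c < W := hc
    have hct : c < trow.length := by omega
    rw [List.range_succ, List.foldl_append, ih (by omega)]
    simp only [List.foldl_cons, List.foldl_nil]
    have hget : trow.getD c "" = trow[c] := List.getD_eq_getElem trow "" hct
    have hokc : pipeOK trow[c] = true := hok _ (List.getElem_mem hct)
    have hrep : List.replicate (3*(W-c)) "0" = z3 (3*(W-(c+1))) := by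
      rw [show (3*(W-c)) = 3 + 3*(W-(c+1)) from by omega]
      simp [z3, List.replicate_add, List.replicate_succ]
    have htk : ∀ x ∈ trow.take c, pipeOK x = true := fun x hx => hok x (List.mem_of_mem_take hx)
    have hlen : ∀ j, j < 3 → (bRow (trow.take c) j).length = 3*c := by
      intro j hj
      rw [bRow_len _ htk j hj, List.length_take]
      omega
    rw [hget, hrep,
      cellstep trow[c] hokc done rest _ _ _ row c hd (hlen 0 (by omega)) (hlen 1 (by omega)) (hlen 2 (by omega))]
    have hb : ∀ j, bRow (trow.take (c+1)) j = bRow (trow.take c) j ++ patRow trow[c] j := by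
      intro j
      rw [List.take_add_one, bRow, List.flatMap_append]
      simp [bRow, List.getElem?_eq_getElem hct]
    simp [hb, List.append_assoc]

lemma len_flatMap3 (l : List (List String)) (f g h : List String → List String) :
    (l.flatMap (fun x => [f x, g x, h x])).length = 3 * l.length := by
  induction l with
  | nil => simp
  | cons a t ih => simp [ih]; omega

lemma outer (t : List (List String)) (W : Nat) (hsh : ∀ row ∈ t, row.length = W)
    (hok : ∀ row ∈ t, ∀ x ∈ row, pipeOK x = true) (m : Nat) (hm : m ≤ t.length) :
    (List.range m).foldl (fun g row =>
        (List.range ((t.getD row []).length)).foldl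
          (fun g col => expandCell g row col ((t.getD row []).getD col "")) g)
        (List.replicate (3*t.length) (zRow W))
      = (t.take m).flatMap (fun trow => [bRow trow 0, bRow trow 1, bRow trow 2])
          ++ List.replicate (3*(t.length - m)) (zRow W) := by
  induction m with
  | zero => simp
  | succ m ih =>
    have hmt : m < t.length := hm
    rw [List.range_succ, List.foldl_append, ih (by omega)]
    simp only [List.foldl_cons, List.foldl_nil]
    have hgetr : t.getD m [] = t[m] := List.getD_eq_getElem t [] hmt
    have hWr : t[m].length = W := hsh _ (List.getElem_mem hmt)
    have hokr : ∀ x ∈ t[m], pipeOK x = true := hok _ (List.getElem_mem hmt)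
    have hdone : ((t.take m).flatMap (fun trow => [bRow trow 0, bRow trow 1, bRow trow 2])).length = 3*m := by
      rw [len_flatMap3, List.length_take]; omega
    have hrep : List.replicate (3*(t.length - m)) (zRow W)
        = zRow W :: zRow W :: zRow W :: List.replicate (3*(t.length - (m+1))) (zRow W) := by
      rw [show (3*(t.length - m)) = 3 + 3*(t.length - (m+1)) from by omega]
      simp [List.replicate_add, List.replicate_succ]
    rw [hgetr, hWr, hrep,
      inner t[m] W hWr hokr m _ _ hdone W (le_refl W)]
    rw [List.take_add_one, List.flatMap_append]
    simp [List.getElem?_eq_getElem hmt]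
    refine ⟨?_,?_,?_⟩ <;> rw [show List.take W t[m] = t[m] from by rw [← hWr]; exact List.take_length]

def tg (t : List (List String)) (i j : Nat) : String := (t.getD i []).getD j ""

lemma getD_set' {α : Type} (l : List α) (n i : Nat) (b : α) (d : α) :
    (l.set n b).getD i d = if i = n ∧ n < l.length then b else l.getD i d := by
  by_cases h1 : i = n
  · subst h1
    by_cases h2 : i < l.length
    · simp [List.getD, List.getElem?_set, h2]
    · rw [if_neg (by omega)]
      simp [List.getD, List.getElem?_set, h2]
  · rw [if_neg (by omega)]
    simp only [List.getD, List.getElem?_set]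
    rw [if_neg (by omega)]

lemma length_setIdxI (xs : List String) (i : Int) (v : String) :
    (setIdxI xs i v).length = xs.length := by
  unfold setIdxI; split <;> (dsimp only; split <;> simp)

lemma length_setCellI (g : List (List String)) (r c : Int) (v : String) :
    (setCellI g r c v).length = g.length := by
  unfold setCellI; split <;> (dsimp only; split <;> simp)

lemma getD_mem' {α : Type} (l : List α) (n : Nat) (d : α) (h : n < l.length) : l.getD n d ∈ l := by
  rw [List.getD_eq_getElem l d h]; exact List.getElem_mem h

lemma rect_setCellI {W : Nat} (g : List (List String)) (hsh : ∀ row ∈ g, row.length = W)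
    (r c : Int) (v : String) : ∀ row ∈ setCellI g r c v, row.length = W := by
  intro row hrow
  unfold setCellI at hrow
  dsimp only at hrow
  split at hrow <;> split at hrow <;>
    first
    | exact hsh _ hrow
    | (rcases List.mem_or_eq_of_mem_set hrow with h|h
       · exact hsh _ h
       · subst h
         rw [length_setIdxI]
         exact hsh _ (getD_mem' _ _ _ (by omega)))

lemma tg_setCellI {W : Nat} (g : List (List String)) (hsh : ∀ row ∈ g, row.length = W)
    (r c : Int) (v : String) (hr1 : -(g.length:Int) ≤ r) (hr2 : r < (g.length:Int))
    (hc1 : -(W:Int) ≤ c) (hc2 : c < (W:Int)) (i j : Nat) (hi : i < g.length) (hj : j < W) :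
    tg (setCellI g r c v) i j = if nrm r g.length = i ∧ nrm c W = j then v else tg g i j := by
  unfold setCellI
  dsimp only
  have hcond : (0 ≤ (if r < 0 then r + (g.length:Int) else r) ∧ (if r < 0 then r + (g.length:Int) else r) < (g.length:Int)) := by split <;> omega
  rw [if_pos hcond]
  have hn : (if r < 0 then r + (g.length:Int) else r).toNat = nrm r g.length := rfl
  have hnlt : nrm r g.length < g.length := by unfold nrm; split <;> omega
  unfold tg
  rw [hn, getD_set' g (nrm r g.length) i _ []]
  by_cases hieq : i = nrm r g.length
  · subst hieq
    rw [if_pos ⟨rfl, hnlt⟩]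
    have hrowlen : (g.getD (nrm r g.length) []).length = W := hsh _ (getD_mem' _ _ _ hnlt)
    unfold setIdxI
    dsimp only
    rw [hrowlen]
    have hcond2 : (0 ≤ (if c < 0 then c + (W:Int) else c) ∧ (if c < 0 then c + (W:Int) else c) < (W:Int)) := by split <;> omega
    rw [if_pos hcond2]
    have hm : (if c < 0 then c + (W:Int) else c).toNat = nrm c W := rfl
    have hmlt : nrm c W < W := by unfold nrm; split <;> omega
    rw [hm, getD_set' _ (nrm c W) j _ ""]
    rw [hrowlen]
    by_cases hjeq : j = nrm c W
    · subst hjeq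
      rw [if_pos ⟨rfl, hmlt⟩, if_pos ⟨rfl, rfl⟩]
    · rw [if_neg (by omega), if_neg (by simp; omega)]
  · rw [if_neg (by omega), if_neg (by omega)]

lemma sRes_ok (p0 p1 pl : List Int) : pipeOK (sRes p0 p1 pl) = true := by
  unfold sRes; split_ifs <;> decide

lemma fold_inv (arr : List (List String)) (R W : Nat) (np : Nat × Nat)
    (ps : List (List Int))
    (hps : ∀ p ∈ ps, -(R:Int) ≤ getI p 0 ∧ getI p 0 < (R:Int) ∧ -(W:Int) ≤ getI p 1 ∧ getI p 1 < (W:Int) ∧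
        ((nrm (getI p 0) R, nrm (getI p 1) W) = np ∨ pipeOK (cellAt arr (getI p 0) (getI p 1)) = true)) :
    ∀ (g : List (List String)), g.length = R → (∀ row ∈ g, row.length = W) →
    (∀ i j, i < R → j < W → (pipeOK (tg g i j) = true ∨ (i, j) = np)) →
    ((ps.foldl (fun t p => setCellI t (getI p 0) (getI p 1) (cellAt arr (getI p 0) (getI p 1))) g).length = R ∧
     (∀ row ∈ ps.foldl (fun t p => setCellI t (getI p 0) (getI p 1) (cellAt arr (getI p 0) (getI p 1))) g, row.length = W) ∧
     (∀ i j, i < R → j < W →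
        (pipeOK (tg (ps.foldl (fun t p => setCellI t (getI p 0) (getI p 1) (cellAt arr (getI p 0) (getI p 1))) g) i j) = true ∨ (i, j) = np))) := by
  induction ps with
  | nil => intro g h1 h2 h3; exact ⟨h1, h2, h3⟩
  | cons p ps ih =>
    intro g h1 h2 h3
    obtain ⟨hr1, hr2, hc1, hc2, hdisj⟩ := hps p (by simp)
    simp only [List.foldl_cons]
    refine ih (fun q hq => hps q (by simp [hq])) _ ?_ ?_ ?_
    · rw [length_setCellI]; exact h1
    · exact rect_setCellI g h2 _ _ _
    · intro i j hi hj
      rw [tg_setCellI g h2 _ _ _ (by omega) (by omega) hc1 hc2 i j (by omega) hj]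
      split
      · rename_i hhit
        rcases hdisj with hnp | hpk
        · right
          rw [h1] at hhit
          rw [← hnp]
          exact Prod.ext_iff.mpr ⟨hhit.1.symm, hhit.2.symm⟩
        · left; exact hpk
      · exact h3 i j hi hj

lemma temp_facts (arr : List (List String)) (pos : List (List Int))
    (hne : arr ≠ [])
    (hrect : ∀ row ∈ arr, row.length = (arr.getD 0 []).length)
    (hlen2 : 2 ≤ pos.length)
    (hp : ∀ p ∈ pos, 2 ≤ p.length ∧
      -(arr.length : Int) ≤ getI p 0 ∧ getI p 0 < (arr.length : Int) ∧
      -((arr.getD 0 []).length : Int) ≤ getI p 1 ∧ getI p 1 < ((arr.getD 0 []).length : Int) ∧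
      ((nrm (getI p 0) arr.length, nrm (getI p 1) (arr.getD 0 []).length)
          = (nrm (getI ((PySem.List.pyGet? pos 0).getD []) 0) arr.length,
             nrm (getI ((PySem.List.pyGet? pos 0).getD []) 1) (arr.getD 0 []).length)
        ∨ pipeOK (cellAt arr (getI p 0) (getI p 1)) = true)) :
    (buildTemp arr pos).length = arr.length ∧
    (∀ row ∈ buildTemp arr pos, row.length = (arr.getD 0 []).length) ∧
    (∀ i j, i < arr.length → j < (arr.getD 0 []).length →
        pipeOK (tg (buildTemp arr pos) i j) = true) := by
  set R := arr.length with hR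
  set W := (arr.getD 0 []).length with hW
  set q0 := (PySem.List.pyGet? pos 0).getD [] with hq0
  set np : Nat × Nat := (nrm (getI q0 0) R, nrm (getI q0 1) W) with hnp
  have hq0mem : q0 ∈ pos := by
    have h0 : pos[0]? = some pos[0] := List.getElem?_eq_getElem (by omega)
    rw [hq0, PySem.List.pyGet?_zero, h0, Option.getD_some]
    exact List.getElem_mem (by omega)
  -- temp0 facts
  set temp0 := (List.range R).map (fun x => (List.range ((arr.getD x []).length)).map (fun _ => ("." : String))) with ht0
  have h0len : temp0.length = R := by simp [ht0]
  have h0rect : ∀ row ∈ temp0, row.length = W := by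
    intro row hrow
    rw [ht0] at hrow
    obtain ⟨x, hx, hxeq⟩ := List.mem_map.mp hrow
    obtain hxR := List.mem_range.mp hx
    rw [← hxeq]
    simp only [List.length_map, List.length_range]
    exact hrect _ (getD_mem' _ _ _ hxR)
  have h0ok : ∀ i j, i < R → j < W → pipeOK (tg temp0 i j) = true := by
    intro i j hi hj
    have hWj : (arr.getD i []).length = W := hrect _ (getD_mem' _ _ _ hi)
    have hcell : tg temp0 i j = "." := by
      have hlen : j < (arr[i]?.getD []).length := by
        have := hWj; simp only [List.getD] at this; omega
      simp [tg, List.getD, ht0, List.getElem?_range, hi, List.getElem?_replicate, hlen]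
    rw [hcell]
    decide
  -- the fold
  have hfold := fold_inv arr R W np pos
    (fun p hq => by
      obtain ⟨_, a1, a2, a3, a4, a5⟩ := hp p hq
      exact ⟨a1, a2, a3, a4, a5⟩)
    temp0 h0len h0rect (fun i j hi hj => Or.inl (h0ok i j hi hj))
  obtain ⟨hf1, hf2, hf3⟩ := hfold
  obtain ⟨_, b1, b2, b3, b4, _⟩ := hp q0 hq0mem
  have hbt : buildTemp arr pos
      = setCellI (pos.foldl (fun t p => setCellI t (getI p 0) (getI p 1) (cellAt arr (getI p 0) (getI p 1))) temp0)
          (getI q0 0) (getI q0 1)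
          (sRes q0 ((PySem.List.pyGet? pos 1).getD []) ((PySem.List.pyGet? pos (-1)).getD [])) := rfl
  set t1 := pos.foldl (fun t p => setCellI t (getI p 0) (getI p 1) (cellAt arr (getI p 0) (getI p 1))) temp0 with ht1
  refine ⟨?_, ?_, ?_⟩
  · rw [hbt, length_setCellI]; exact hf1
  · rw [hbt]; exact rect_setCellI t1 hf2 _ _ _
  · intro i j hi hj
    rw [hbt, tg_setCellI t1 hf2 _ _ _ (by omega) (by omega) b3 b4 i j (by omega) hj]
    split
    · rename_i hhit
      exact sRes_ok _ _ _
    · rename_i hmiss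
      rcases hf3 i j hi hj with hok | hnpeq
      · exact hok
      · exfalso
        apply hmiss
        rw [hnp] at hnpeq
        have h1' := congrArg Prod.fst hnpeq
        have h2' := congrArg Prod.snd hnpeq
        simp only [] at h1' h2'
        rw [hf1]
        exact ⟨h1'.symm, h2'.symm⟩

theorem main (arr : List (List String)) (pos : List (List Int))
    (hne : arr ≠ [])
    (hrect : ∀ row ∈ arr, row.length = (arr.getD 0 []).length)
    (hlen2 : 2 ≤ pos.length)
    (hp : ∀ p ∈ pos, 2 ≤ p.length ∧
      -(arr.length : Int) ≤ getI p 0 ∧ getI p 0 < (arr.length : Int) ∧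
      -((arr.getD 0 []).length : Int) ≤ getI p 1 ∧ getI p 1 < ((arr.getD 0 []).length : Int) ∧
      ((nrm (getI p 0) arr.length, nrm (getI p 1) (arr.getD 0 []).length)
          = (nrm (getI ((PySem.List.pyGet? pos 0).getD []) 0) arr.length,
             nrm (getI ((PySem.List.pyGet? pos 0).getD []) 1) (arr.getD 0 []).length)
        ∨ pipeOK (cellAt arr (getI p 0) (getI p 1)) = true)) :
    convert arr pos = convert_alt arr pos := by
  obtain ⟨hTlen, hTrect, hTok⟩ := temp_facts arr pos hne hrect hlen2 hp
  set W := (arr.getD 0 []).length with hW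
  set t := buildTemp arr pos with ht
  have hmok : ∀ row ∈ t, ∀ x ∈ row, pipeOK x = true := by
    intro row hrow x hx
    obtain ⟨i, hi, hieq⟩ := List.mem_iff_getElem.mp hrow
    obtain ⟨j, hj, hjeq⟩ := List.mem_iff_getElem.mp hx
    have hrlen : row.length = W := hTrect _ hrow
    have : tg t i j = x := by
      rw [tg, List.getD_eq_getElem _ _ hi, hieq, List.getD_eq_getElem _ _ hj, hjeq]
    rw [← this]
    exact hTok i j (by omega) (by omega)
  have hnew : (List.range (3 * arr.length)).map (fun _ => (List.range (3 * W)).map (fun _ => ("0" : String)))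
      = List.replicate (3 * t.length) (zRow W) := by
    rw [hTlen]
    simp [List.map_const', zRow]
  show (List.range t.length).foldl (fun g row =>
      (List.range ((t.getD row []).length)).foldl
        (fun g col => expandCell g row col ((t.getD row []).getD col "")) g)
      ((List.range (3 * arr.length)).map (fun _ => (List.range (3 * W)).map (fun _ => "0")))
    = t.flatMap (fun trow => (List.range 3).map (fun i => trow.flatMap (fun cell => patRow cell i)))
  rw [hnew, outer t W hTrect hmok t.length (le_refl _)]
  simp only [List.take_length, Nat.sub_self, Nat.mul_zero, List.replicate_zero, List.append_nil]
  congr 1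

-- ===== VERDICT (by name: the statement is the Claim_ definition above) =====
theorem convert_spec : Claim_equal_convert := by
  intro arr pos _ hpre
  unfold Spec_convert
  obtain ⟨hne, hrect, hlen2, hp⟩ := hpre
  exact main arr pos hne hrect hlen2 hp
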